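-- pv_equiv track=rewrite | github.com/polaris64/advent-of-code | 2020/09/solve.py | scan_list
-- ===== SOURCE A (Python) =====
-- from itertools import combinations
--
-- def scan_list(inp, preamble_len):
--     idx_start = 0
--     for (idx, item) in enumerate(inp):
--         if idx < preamble_len:
--             continue
--         pairs = find_pairs(inp, item, idx_start, preamble_len)
--         yield (idx, item, pairs)
--         idx_start += 1
--
-- def find_pairs(inp, item, idx_start, preamble_len):
--     source = inp[idx_start:idx_start + preamble_len]
--     for pair in combinations(source, 2):
--         if sum(pair) == item:
--             return pair
--     return None
-- ===== SOURCE B (Python) =====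
-- def find_complement(window, item):
--     # one O(p) pass: cnt holds the multiset of elements strictly after the
--     # current position; a pair exists at position i iff item - window[i] is there
--     cnt = {}
--     for v in window:
--         cnt[v] = cnt.get(v, 0) + 1
--     for v in window:
--         cnt[v] = cnt[v] - 1
--         need = item - v
--         if cnt.get(need, 0) > 0:
--             return (v, need)
--     return None
--
-- def scan_list(inp, preamble_len):
--     for i, v in enumerate(inp):
--         if i >= preamble_len:
--             yield (i, v, find_complement(inp[i - preamble_len:i], v))
-- ===== Notes on version B (the rewrite author's own statement) =====
-- stated objective: faster
-- what changed: Replaces the quadratic scan of all 2-combinations of each window with one linear pass per window that keeps a dict of counts of the elements after the current position and looks up the complement item - v.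
import Mathlib
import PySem

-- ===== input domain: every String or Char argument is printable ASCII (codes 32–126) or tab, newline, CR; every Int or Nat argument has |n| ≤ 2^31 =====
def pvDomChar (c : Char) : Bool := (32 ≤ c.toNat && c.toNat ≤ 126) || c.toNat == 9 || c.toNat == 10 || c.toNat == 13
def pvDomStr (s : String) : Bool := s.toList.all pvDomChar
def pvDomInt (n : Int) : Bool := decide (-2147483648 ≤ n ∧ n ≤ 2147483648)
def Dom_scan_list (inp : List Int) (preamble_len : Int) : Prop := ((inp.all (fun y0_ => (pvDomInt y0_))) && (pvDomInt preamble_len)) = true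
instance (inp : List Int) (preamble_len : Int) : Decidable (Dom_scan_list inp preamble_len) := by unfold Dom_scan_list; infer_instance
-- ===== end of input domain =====

-- B replaces A's quadratic scan of all 2-combinations of each window by one linear pass
-- with a dict of counts of the elements after the current position (complement lookup);
-- the generators are compared by the list of yielded triples.

-- ===== PORT A =====
-- itertools.combinations(source, 2), in Python's order
def pvCombos2 : List Int → List (Int × Int)
  | [] => []
  | x :: xs => xs.map (fun y => (x, y)) ++ pvCombos2 xs

def find_pairs (inp : List Int) (item : Int) (idx_start : Int) (preamble_len : Int) :
    Option (Int × Int) :=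
  let source := PySem.List.slice inp (some idx_start) (some (idx_start + preamble_len))
  (pvCombos2 source).find? (fun pr => pr.1 + pr.2 == item)

-- the 'for (idx, item) in enumerate(inp)' loop with the idx_start accumulator
def pvScanA (inp : List Int) (p : Int) :
    List (Int × Int) → Int → List (Int × Int × (Option (Int × Int)))
  | [], _ => []
  | (idx, item) :: rest, idx_start =>
    if idx < p then pvScanA inp p rest idx_start
    else (idx, item, find_pairs inp item idx_start p) :: pvScanA inp p rest (idx_start + 1)

def scan_list (inp : List Int) (preamble_len : Int) : List (Int × Int × (Option (Int × Int))) :=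
  pvScanA inp preamble_len (PySem.List.enumerate inp 0) 0

-- ===== PORT B =====
-- second loop of find_complement: cnt holds counts of elements after the current position
def pvFindGo (item : Int) : PySem.Dict Int Int → List Int → Option (Int × Int)
  | _, [] => none
  | d, v :: rest =>
    let d' := d.insert v (d.getD v 0 - 1)
    if 0 < d'.getD (item - v) 0 then some (v, item - v) else pvFindGo item d' rest

def find_complement (window : List Int) (item : Int) : Option (Int × Int) :=
  let cnt := window.foldl (fun d v => d.insert v (d.getD v 0 + 1)) PySem.Dict.empty
  pvFindGo item cnt window

def pvScanB (inp : List Int) (p : Int) :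
    List (Int × Int) → List (Int × Int × (Option (Int × Int)))
  | [] => []
  | (i, v) :: rest =>
    if p ≤ i then
      (i, v, find_complement (PySem.List.slice inp (some (i - p)) (some i)) v) :: pvScanB inp p rest
    else pvScanB inp p rest

def scan_list_alt (inp : List Int) (preamble_len : Int) : List (Int × Int × (Option (Int × Int))) :=
  pvScanB inp preamble_len (PySem.List.enumerate inp 0)

-- ===== PRECONDITION & SPEC =====
-- Pre_ excludes negative preamble_len — outside the task's natural domain (a window length):
-- there A's slice stop goes negative and Python's negative-index wraparound produces accidental windows.
def Pre_scan_list (inp : List Int) (preamble_len : Int) : Prop := 0 ≤ preamble_len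
instance (inp : List Int) (preamble_len : Int) : Decidable (Pre_scan_list inp preamble_len) := by unfold Pre_scan_list; infer_instance
def pvWitness_scan_list : List Int × Int := ([1, 2, 3, 5], 2)

def Spec_scan_list (inp : List Int) (preamble_len : Int) (out : List (Int × Int × (Option (Int × Int)))) : Prop := out = scan_list_alt inp preamble_len
instance (inp : List Int) (preamble_len : Int) (out : List (Int × Int × (Option (Int × Int)))) : Decidable (Spec_scan_list inp preamble_len out) := by unfold Spec_scan_list; infer_instance

-- ===== CLAIM (what is proved, stated in full; the proofs are below) =====
def Claim_equal_scan_list : Prop := ∀ (inp : List Int) (preamble_len : Int), Dom_scan_list inp preamble_len → Pre_scan_list inp preamble_len → Spec_scan_list inp preamble_len (scan_list inp preamble_len)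

-- ===== LEMMAS AND PROOFS =====

-- common characterisation of both pair searches: first v whose complement occurs later
def pvSpecFind (t : Int) : List Int → Option (Int × Int)
  | [] => none
  | v :: rest => if (t - v) ∈ rest then some (v, t - v) else pvSpecFind t rest

theorem find?_complement (x t : Int) (xs : List Int) :
    xs.find? (fun y => x + y == t) = if (t - x) ∈ xs then some (t - x) else none := by
  induction xs with
  | nil => simp
  | cons y ys ih =>
    by_cases h : x + y = t
    · have hb : (x + y == t) = true := by simp [h]
      have : y = t - x := by omega
      simp [List.find?, hb, this]
    · have hb : (x + y == t) = false := by simp [h]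
      have hy : (t - x) ≠ y := by omega
      simp [List.find?, hb, ih, hy]

theorem combos2_find?_eq (t : Int) (w : List Int) :
    (pvCombos2 w).find? (fun pr => pr.1 + pr.2 == t) = pvSpecFind t w := by
  induction w with
  | nil => simp [pvCombos2, pvSpecFind]
  | cons x xs ih =>
    simp only [pvCombos2, pvSpecFind, List.find?_append, List.find?_map]
    rw [show ((fun pr : Int × Int => pr.1 + pr.2 == t) ∘ fun y => (x, y)) = fun y => x + y == t from rfl]
    rw [find?_complement x t xs]
    by_cases h : (t - x) ∈ xs
    · simp [h]
    · simp [h, ih]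

theorem pvFindGo_eq (t : Int) (w : List Int) (d : PySem.Dict Int Int)
    (h : ∀ k, d.getD k 0 = (w.count k : Int)) :
    pvFindGo t d w = pvSpecFind t w := by
  induction w generalizing d with
  | nil => simp [pvFindGo, pvSpecFind]
  | cons v rest ih =>
    have hd' : ∀ k, (d.insert v (d.getD v 0 - 1)).getD k 0 = (rest.count k : Int) := by
      intro k
      rw [PySem.Dict.getD_insert]
      by_cases hk : k = v
      · rw [if_pos hk, hk, h v, List.count_cons_self]; push_cast; ring
      · have hvk : ¬ v = k := fun e => hk e.symm
        rw [if_neg hk, h k]; norm_cast; simp [List.count_cons, hvk]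
    simp only [pvFindGo, pvSpecFind]
    rw [hd' (t - v)]
    by_cases hm : (t - v) ∈ rest
    · have : 0 < rest.count (t - v) := List.count_pos_iff.mpr hm
      rw [if_pos (by exact_mod_cast this), if_pos hm]
    · have : rest.count (t - v) = 0 := List.count_eq_zero.mpr hm
      rw [this]
      simp only [Int.natCast_zero, lt_irrefl, if_false, if_neg hm]
      exact ih _ hd'

theorem find_complement_eq (w : List Int) (t : Int) :
    find_complement w t = pvSpecFind t w := by
  unfold find_complement
  exact pvFindGo_eq t w _ (fun k => by
    rw [PySem.Dict.getD_foldl_insert_add_one, PySem.Dict.getD_empty]; ring)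

theorem find_pairs_eq (inp : List Int) (item a b : Int) :
    find_pairs inp item a b =
      pvSpecFind item (PySem.List.slice inp (some a) (some (a + b))) := by
  unfold find_pairs
  exact combos2_find?_eq item _

theorem pvScan_eq (inp : List Int) (p : Int) :
    ∀ (l : List Int) (s idx_start : Int), 0 ≤ s → idx_start = max (s - p) 0 →
      pvScanA inp p (PySem.List.enumerate l s) idx_start =
      pvScanB inp p (PySem.List.enumerate l s) := by
  intro l
  induction l with
  | nil => intro s idx_start _ _; simp [PySem.List.enumerate_nil, pvScanA, pvScanB]
  | cons x xs ih =>
    intro s idx_start hs hinv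
    rw [PySem.List.enumerate_cons]
    simp only [pvScanA, pvScanB]
    by_cases h : s < p
    · rw [if_pos h, if_neg (by omega)]
      exact ih (s + 1) idx_start (by omega) (by omega)
    · rw [if_neg h, if_pos (by omega)]
      have ha : idx_start = s - p := by omega
      subst ha
      rw [find_pairs_eq inp x (s - p) p, show s - p + p = s by ring,
          find_complement_eq]
      rw [ih (s + 1) (s - p + 1) (by omega) (by omega)]

-- ===== VERDICT (by name: the statement is the Claim_ definition above) =====
theorem scan_list_spec : Claim_equal_scan_list := by
  intro inp p _ hpre
  unfold Pre_scan_list at hpre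
  unfold Spec_scan_list scan_list scan_list_alt
  exact pvScan_eq inp p inp 0 0 le_rfl (by omega)
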